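-- pv_equiv track=rewrite | github.com/erperreault/scratch | puzzles/LinkedList/solution.py | solution
-- ===== SOURCE A (Python) =====
-- class Node:
--     def __init__(self, next=None, val=0):
--         self.next = next
--         self.val = val
--
-- def solution(start: int):
--     head = Node(val=start)
--     current = head
--     ans = []
--
--     """Populate a list with new nodes of decreasing value."""
--     while current.val >= 0:
--         current.next = Node(val=current.val-1)
--         current = current.next
--
--     """Start from the head node and read values until final node."""
--     new = head
--     while new.next is not None:
--         ans.append(new.val)
--         new = new.next
--
--     return ans
-- ===== SOURCE B (Python) =====
-- def solution(start: int):
--     return list(range(start, -1, -1))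
-- ===== Notes on version B (the rewrite author's own statement) =====
-- stated objective: faster
-- what changed: Replaces the Node linked-list construction and the two while loops (build then traverse) with a single descending range call producing [start, ..., 0], empty for negative start.
import Mathlib
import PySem

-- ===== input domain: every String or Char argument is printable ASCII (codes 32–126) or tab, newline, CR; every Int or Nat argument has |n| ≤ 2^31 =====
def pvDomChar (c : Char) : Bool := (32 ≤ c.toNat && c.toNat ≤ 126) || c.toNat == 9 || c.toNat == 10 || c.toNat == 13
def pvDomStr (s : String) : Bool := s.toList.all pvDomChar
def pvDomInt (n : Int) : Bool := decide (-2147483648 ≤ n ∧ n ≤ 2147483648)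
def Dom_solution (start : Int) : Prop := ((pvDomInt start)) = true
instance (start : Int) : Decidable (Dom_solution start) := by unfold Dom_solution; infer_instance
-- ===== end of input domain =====

-- B replaces A's linked-list build-and-traverse (Node chain + two while loops) with one direct range(start, -1, -1); objective: simpler.


-- ===== PORT A =====
-- The Node chain starting at `head` is represented by the list of its vals in order.
-- First while loop: while current.val >= 0, append a node with val-1 and advance.
def solutionChain (v : Int) : List Int :=
  if 0 ≤ v then v :: solutionChain (v - 1) else [v]
termination_by (v + 1).toNat
decreasing_by simp_wf; omega

-- Second while loop: from head, append new.val while new.next is not None (i.e. all but the last node).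
def solutionRead : List Int → List Int
  | [] => []
  | [_] => []
  | x :: y :: rest => x :: solutionRead (y :: rest)

def solution (start : Int) : List Int :=
  solutionRead (solutionChain start)

-- ===== PORT B =====
def solution_alt (start : Int) : List Int :=
  PySem.List.pyRange start (-1) (-1)

-- ===== PRECONDITION & SPEC =====
def Spec_solution (start : Int) (out : List Int) : Prop := out = solution_alt start
instance (start : Int) (out : List Int) : Decidable (Spec_solution start out) := by unfold Spec_solution; infer_instance

-- ===== CLAIM (what is proved, stated in full; the proofs are below) =====
def Claim_equal_solution : Prop := ∀ (start : Int), Dom_solution start → Spec_solution start (solution start)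

-- ===== LEMMAS AND PROOFS =====
theorem solutionChain_neg (v : Int) (h : v < 0) : solutionChain v = [v] := by
  rw [solutionChain]; simp [not_le.mpr h]

theorem solutionChain_nonneg (v : Int) (h : 0 ≤ v) :
    solutionChain v = v :: solutionChain (v - 1) := by
  rw [solutionChain]; simp [h]

theorem solutionChain_ne_nil (v : Int) : solutionChain v ≠ [] := by
  rw [solutionChain]; split <;> simp

theorem solutionRead_cons (x : Int) (l : List Int) (h : l ≠ []) :
    solutionRead (x :: l) = x :: solutionRead l := by
  cases l with
  | nil => exact absurd rfl h
  | cons y rest => rfl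

theorem solution_key : ∀ (n : Nat) (v : Int), v.toNat = n →
    solutionRead (solutionChain v) = PySem.List.pyRange v (-1) (-1) := by
  intro n
  induction n with
  | zero =>
    intro v hv
    rcases lt_or_ge v 0 with h | h
    · rw [solutionChain_neg v h, PySem.List.pyRange_neg_one_eq_nil (by omega)]
      rfl
    · have hv0 : v = 0 := by omega
      subst hv0
      rw [solutionChain_nonneg 0 le_rfl, solutionChain_neg (0 - 1) (by norm_num)]
      rw [PySem.List.pyRange_neg_one_cons (by norm_num),
          PySem.List.pyRange_neg_one_eq_nil (by norm_num)]
      rfl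
  | succ k ih =>
    intro v hv
    have hvpos : 0 < v := by omega
    rw [solutionChain_nonneg v (le_of_lt hvpos),
        solutionRead_cons v _ (solutionChain_ne_nil (v - 1)),
        PySem.List.pyRange_neg_one_cons (show (-1 : Int) < v by omega),
        ih (v - 1) (by omega)]

-- ===== VERDICT (by name: the statement is the Claim_ definition above) =====
theorem solution_spec : Claim_equal_solution := by
  intro start _
  exact solution_key start.toNat start rfl
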